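-- pv_equiv track=rewrite | github.com/neurosimata/seizy_ml | helper/array_helper.py | contiguous_ones
-- ===== SOURCE A (Python) =====
-- def contiguous_ones(arr, dur):
--     count = 0  # Counts the number of contiguous True sequences
--
--     for val in arr:
--         if val:
--             count += 1
--         else:
--             count = 0
--         if count > dur:
--             return True
--     return False
-- ===== SOURCE B (Python) =====
-- from itertools import groupby
--
-- def contiguous_ones(arr, dur):
--     for k, g in groupby(arr, key=bool):
--         if k and sum(1 for _ in g) > dur:
--             return True
--     return False
-- ===== Notes on version B (the rewrite author's own statement) =====
-- stated objective: idiomatic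
-- what changed: B replaces the per-element counter with itertools.groupby: the array is split into maximal runs by truthiness and each truthy run's length is tested once against dur, instead of maintaining and resetting a running count per element.
-- intended difference: On nonempty all-falsy arrays with dur < 0, A returns True because its reset counter 0 still exceeds the negative dur, while B returns False; B's value is intended since no truthy run of any length exists. — e.g. on contiguous_ones([false], -1): A returns true, B returns false
import Mathlib
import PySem

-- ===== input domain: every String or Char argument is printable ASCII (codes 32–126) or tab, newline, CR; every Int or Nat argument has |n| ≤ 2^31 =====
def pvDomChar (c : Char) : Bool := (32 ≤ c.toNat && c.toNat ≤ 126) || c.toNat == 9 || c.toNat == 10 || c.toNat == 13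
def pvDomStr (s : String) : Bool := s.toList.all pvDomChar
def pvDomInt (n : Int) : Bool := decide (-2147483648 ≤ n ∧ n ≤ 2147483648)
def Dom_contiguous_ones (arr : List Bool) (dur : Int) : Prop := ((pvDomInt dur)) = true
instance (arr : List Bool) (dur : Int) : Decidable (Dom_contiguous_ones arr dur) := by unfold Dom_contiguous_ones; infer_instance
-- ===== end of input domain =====

-- B groups the array into maximal runs (itertools.groupby) and tests each truthy run's length
-- once, instead of A's per-element running counter; idiomatic, same cost. On nonempty all-False
-- arrays with dur < 0 the values differ intentionally (see D_ below).

-- ===== PORT A =====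
-- the loop over arr carrying `count`; early `return True` becomes the if-branch
def contiguousAux (dur : Int) : List Bool → Int → Bool
  | [], _ => false
  | v :: rest, count =>
    let count' := if v then count + 1 else 0
    if count' > dur then true else contiguousAux dur rest count'

def contiguous_ones (arr : List Bool) (dur : Int) : Bool :=
  contiguousAux dur arr 0

-- ===== PORT B =====
-- itertools.groupby(arr, key=bool): list of (key, run length) for the maximal runs
def pyGroupBy : List Bool → List (Bool × Int)
  | [] => []
  | x :: xs =>
    (x, (xs.takeWhile (fun y => y == x)).length + 1) :: pyGroupBy (xs.dropWhile (fun y => y == x))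
termination_by l => l.length
decreasing_by
  simpa using Nat.lt_succ_of_le (List.length_dropWhile_le (fun y => y == x) xs)

-- the for-loop with early `return True` is `any` over the groups
def contiguous_ones_alt (arr : List Bool) (dur : Int) : Bool :=
  (pyGroupBy arr).any (fun p => p.1 && p.2 > dur)

-- ===== PRECONDITION & SPEC =====
-- On nonempty all-falsy arrays with dur < 0, A returns True because its reset counter 0 still
-- exceeds the negative dur, while B returns False; B's value is intended since no truthy run
-- of any length exists.
def D_contiguous_ones (arr : List Bool) (dur : Int) : Prop :=
  dur < 0 ∧ arr ≠ [] ∧ arr.all (fun b => !b)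
instance (arr : List Bool) (dur : Int) : Decidable (D_contiguous_ones arr dur) := by
  unfold D_contiguous_ones; infer_instance

def Spec_contiguous_ones (arr : List Bool) (dur : Int) (out : Bool) : Prop :=
  ¬ D_contiguous_ones arr dur → out = contiguous_ones_alt arr dur
instance (arr : List Bool) (dur : Int) (out : Bool) : Decidable (Spec_contiguous_ones arr dur out) := by
  unfold Spec_contiguous_ones; infer_instance

def pvDiffWitness_contiguous_ones : List Bool × Int := ([false], -1)
def pvDiffWitnessOut_contiguous_ones : Bool × Bool := (true, false)

-- ===== CLAIM (what is proved, stated in full; the proofs are below) =====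
def Claim_unchanged_contiguous_ones : Prop := ∀ (arr : List Bool) (dur : Int), Dom_contiguous_ones arr dur → Spec_contiguous_ones arr dur (contiguous_ones arr dur)
def Claim_changed_contiguous_ones : Prop := Dom_contiguous_ones (pvDiffWitness_contiguous_ones.1) (pvDiffWitness_contiguous_ones.2) ∧ D_contiguous_ones (pvDiffWitness_contiguous_ones.1) (pvDiffWitness_contiguous_ones.2) ∧ contiguous_ones (pvDiffWitness_contiguous_ones.1) (pvDiffWitness_contiguous_ones.2) = pvDiffWitnessOut_contiguous_ones.1 ∧ contiguous_ones_alt (pvDiffWitness_contiguous_ones.1) (pvDiffWitness_contiguous_ones.2) = pvDiffWitnessOut_contiguous_ones.2 ∧ pvDiffWitnessOut_contiguous_ones.1 ≠ pvDiffWitnessOut_contiguous_ones.2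
def Claim_exact_contiguous_ones : Prop := ∀ (arr : List Bool) (dur : Int), Dom_contiguous_ones arr dur → D_contiguous_ones arr dur → contiguous_ones arr dur ≠ contiguous_ones_alt arr dur

-- ===== LEMMAS AND PROOFS =====

-- a run of n+1 Trues: A returns true iff the count reaches above dur, else continues with count+n+1
lemma auxTrueRun (dur : Int) (n : Nat) : ∀ (c : Int) (d : List Bool),
    contiguousAux dur (List.replicate (n + 1) true ++ d) c
      = if c + (n + 1) > dur then true else contiguousAux dur d (c + (n + 1)) := by
  induction n with
  | zero =>
    intro c d
    simp [contiguousAux]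
  | succ m ih =>
    intro c d
    rw [List.replicate_succ]
    simp only [List.cons_append, contiguousAux, if_true]
    by_cases h : c + 1 > dur
    · rw [if_pos (by simpa using h), if_pos (by omega)]
    · rw [if_neg (by simpa using h), ih (c + 1) d]
      have : c + 1 + (↑m + 1) = c + (↑m + 1 + 1) := by ring
      rw [this]
      push_cast
      ring_nf

-- a run of n+1 Falses with 0 ≤ dur: the counter just resets
lemma auxFalseRun (dur : Int) (hdur : 0 ≤ dur) (n : Nat) : ∀ (c : Int) (d : List Bool),
    contiguousAux dur (List.replicate (n + 1) false ++ d) c = contiguousAux dur d 0 := by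
  induction n with
  | zero => intro c d; simp [contiguousAux]; omega
  | succ m ih =>
    intro c d
    rw [List.replicate_succ]
    simp only [List.cons_append, contiguousAux, Bool.false_eq_true, if_false]
    rw [if_neg (by omega), ih 0 d]

-- if the list does not start with True, the incoming count is irrelevant
lemma auxIndep (dur c : Int) (d : List Bool) (h : d.head? ≠ some true) :
    contiguousAux dur d c = contiguousAux dur d 0 := by
  cases d with
  | nil => rfl
  | cons a d' =>
    cases a with
    | false => simp [contiguousAux]
    | true => simp at h

-- takeWhile (· == x) yields a replicate of x
lemma takeWhile_eq_replicate (x : Bool) (l : List Bool) :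
    l.takeWhile (fun y => y == x) = List.replicate (l.takeWhile (fun y => y == x)).length x := by
  induction l with
  | nil => rfl
  | cons a l ih =>
    by_cases h : a = x
    · subst h; simp [List.replicate_succ, ← ih]
    · simp [h]

-- the head of dropWhile (· == x) is not x
lemma head?_dropWhile_ne (x : Bool) (l : List Bool) :
    (l.dropWhile (fun y => y == x)).head? ≠ some x := by
  induction l with
  | nil => simp
  | cons a l ih =>
    by_cases h : a = x
    · subst h; simpa [List.dropWhile_cons] using ih
    · simp [h]

-- equivalence for non-negative dur, by the recursion structure of pyGroupBy
lemma main_eq_nonneg (dur : Int) (hdur : 0 ≤ dur) : ∀ (arr : List Bool),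
    contiguousAux dur arr 0 = (pyGroupBy arr).any (fun p => p.1 && p.2 > dur) := by
  intro arr
  induction arr using pyGroupBy.induct with
  | case1 => simp [pyGroupBy, contiguousAux]
  | case2 x xs ih =>
    set t := xs.takeWhile (fun y => y == x) with ht
    set d := xs.dropWhile (fun y => y == x) with hd
    have htr : t = List.replicate t.length x := by
      conv_lhs => rw [ht, takeWhile_eq_replicate]
    have hsplit : x :: xs = List.replicate (t.length + 1) x ++ d := by
      rw [List.replicate_succ, List.cons_append]
      congr 1
      conv_lhs => rw [← List.takeWhile_append_dropWhile (p := fun y => y == x) (l := xs)]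
      rw [← ht, ← hd, ← htr]
    conv_lhs => rw [hsplit]
    rw [pyGroupBy.eq_def]
    simp only [List.any_cons, ← ht, ← hd]
    cases x with
    | true =>
      rw [auxTrueRun]
      have hhead : d.head? ≠ some true := head?_dropWhile_ne true xs
      by_cases h : (0 : Int) + (t.length + 1) > dur
      · rw [if_pos h]
        have : ((t.length : Int) + 1 > dur) = True := by simp; omega
        simp [this]
      · rw [if_neg h, auxIndep dur _ d hhead, ih]
        have : ¬ ((t.length : Int) + 1 > dur) := by omega
        simp [this]
    | false =>
      rw [auxFalseRun dur hdur, ih]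
      simp

-- for negative dur, A returns true on any nonempty array: the very first count' (0 or 1) exceeds dur
lemma a_true_neg (dur : Int) (hdur : dur < 0) (v : Bool) (rest : List Bool) :
    contiguousAux dur (v :: rest) 0 = true := by
  cases v <;> simp [contiguousAux] <;> omega

-- for negative dur, B returns true as soon as some element is true
lemma alt_true_of_any (dur : Int) (hdur : dur < 0) : ∀ (arr : List Bool),
    arr.any id = true → (pyGroupBy arr).any (fun p => p.1 && p.2 > dur) = true := by
  intro arr
  induction arr using pyGroupBy.induct with
  | case1 => simp
  | case2 x xs ih =>
    intro hany
    rw [pyGroupBy.eq_def]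
    simp only [List.any_cons]
    cases x with
    | true =>
      have hlen : ((xs.takeWhile (fun y => y == true)).length + 1 : Int) > dur := by
        have : (0:Int) ≤ (xs.takeWhile (fun y => y == true)).length := by positivity
        omega
      have hh : (true && decide (((xs.takeWhile (fun y => y == true)).length + 1 : Int) > dur)) = true := by
        simp only [Bool.true_and]
        exact decide_eq_true hlen
      rw [hh, Bool.true_or]
    | false =>
      have hxs : xs.any id = true := by simpa using hany
      have hdrop : (xs.dropWhile (fun y => y == false)).any id = true := by
        rcases List.any_eq_true.mp hxs with ⟨b, hb, hbt⟩
        simp only [id] at hbt; subst hbt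
        have : true ∈ xs.dropWhile (fun y => y == false) := by
          have hsplit := List.takeWhile_append_dropWhile (p := fun y => y == false) (l := xs)
          rw [← hsplit] at hb
          rcases List.mem_append.mp hb with h1 | h2
          · exact absurd (List.mem_takeWhile_imp h1) (by simp)
          · exact h2
        exact List.any_eq_true.mpr ⟨true, this, rfl⟩
      simp only [Bool.false_and, Bool.false_or]
      exact ih hdrop

-- on an all-false array, all groups have key false, so B returns false
lemma alt_false_of_allfalse (dur : Int) : ∀ (arr : List Bool),
    arr.all (fun b => !b) = true → (pyGroupBy arr).any (fun p => p.1 && p.2 > dur) = false := by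
  intro arr
  induction arr using pyGroupBy.induct with
  | case1 => simp [pyGroupBy]
  | case2 x xs ih =>
    intro hall
    have hx : x = false := by
      have h := List.all_eq_true.mp hall x (by simp)
      cases x
      · rfl
      · simp at h
    subst hx
    have hxs : xs.all (fun b => !b) = true := by
      rw [List.all_eq_true] at hall ⊢; intro b hb; exact hall b (List.mem_cons_of_mem _ hb)
    have hdrop : (xs.dropWhile (fun y => y == false)).all (fun b => !b) = true := by
      rw [List.all_eq_true] at hxs ⊢
      intro b hb
      exact hxs b ((List.dropWhile_sublist _).subset hb)
    rw [pyGroupBy.eq_def]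
    simp only [List.any_cons, Bool.false_and, Bool.false_or]
    exact ih hdrop

-- ===== VERDICT (by name: the statements are the Claim_ definitions above) =====
theorem contiguous_ones_spec : Claim_unchanged_contiguous_ones := by
  intro arr dur _ hnD
  unfold contiguous_ones contiguous_ones_alt
  by_cases hdur : 0 ≤ dur
  · exact main_eq_nonneg dur hdur arr
  · have hneg : dur < 0 := by omega
    unfold D_contiguous_ones at hnD
    push_neg at hnD
    cases arr with
    | nil => simp [contiguousAux, pyGroupBy]
    | cons v rest =>
      have hne : v :: rest ≠ [] := by simp
      have hnall : ¬ (v :: rest).all (fun b => !b) = true := hnD hneg hne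
      have hany : (v :: rest).any id = true := by
        rw [List.all_eq_true] at hnall
        push_neg at hnall
        rcases hnall with ⟨b, hb, hbf⟩
        have : b = true := by cases b <;> simp_all
        exact List.any_eq_true.mpr ⟨b, hb, by simp [this]⟩
      rw [a_true_neg dur hneg, alt_true_of_any dur hneg _ hany]

theorem contiguous_ones_changed : Claim_changed_contiguous_ones := by
  unfold Claim_changed_contiguous_ones
  refine ⟨by decide, by decide, by decide, ?_, by decide⟩
  show contiguous_ones_alt [false] (-1) = false
  unfold contiguous_ones_alt
  rw [pyGroupBy.eq_def]
  simp [pyGroupBy]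

theorem contiguous_ones_tight : Claim_exact_contiguous_ones := by
  intro arr dur _ hD
  obtain ⟨hneg, hne, hall⟩ := hD
  cases arr with
  | nil => exact absurd rfl hne
  | cons v rest =>
    unfold contiguous_ones contiguous_ones_alt
    rw [a_true_neg dur hneg, alt_false_of_allfalse dur _ hall]
    simp
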